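-- pv_equiv track=rewrite | github.com/nanyoojinee/Baekjoon | 프로그래머스/lv3/84021. 퍼즐 조각 채우기/퍼즐 조각 채우기.py | dfs
-- ===== SOURCE A (Python) =====
-- def dfs(graph,x,y,position,n,num):
--     xydic = {0:[-1, 0], 1:[0, 1], 2:[1, 0], 3:[0, -1]}
--     puzzle = [position]
--     for i in range(4):
--         nx = x + xydic[i][0]
--         ny = y + xydic[i][1]
--
--         if 0 <= nx < n and 0 <= ny < n and graph[nx][ny] == num:
--             graph[nx][ny] = 2
--             puzzle = puzzle + dfs(graph,nx,ny,[position[0]+xydic[i][0],position[1]+xydic[i][1]],n,num)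
--
--     return puzzle
-- ===== SOURCE B (Python) =====
-- def dfs(graph, x, y, position, n, num):
--     # Iterative DFS: explicit stack of (cell, relative position, next direction to scan).
--     # Marks a neighbour 2 at discovery and resumes the parent's direction scan after the
--     # child's subtree, so the preorder output and the in-place marking match the recursion.
--     xydic = {0: [-1, 0], 1: [0, 1], 2: [1, 0], 3: [0, -1]}
--     puzzle = [position]
--     stack = [(x, y, position, 0)]
--     while stack:
--         cx, cy, cpos, i = stack.pop()
--         if i == 4:
--             continue
--         stack.append((cx, cy, cpos, i + 1))
--         dx, dy = xydic[i]
--         nx, ny = cx + dx, cy + dy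
--         if 0 <= nx < n and 0 <= ny < n and graph[nx][ny] == num:
--             graph[nx][ny] = 2
--             npos = [cpos[0] + dx, cpos[1] + dy]
--             puzzle.append(npos)
--             stack.append((nx, ny, npos, 0))
--     return puzzle
-- ===== Notes on version B (the rewrite author's own statement) =====
-- stated objective: alternative
-- what changed: The recursive flood fill is replaced by an iterative DFS over an explicit stack of (cell, relative position, next-direction) frames; no recursion, one result list appended to in place instead of repeated list concatenation.
import Mathlib
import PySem

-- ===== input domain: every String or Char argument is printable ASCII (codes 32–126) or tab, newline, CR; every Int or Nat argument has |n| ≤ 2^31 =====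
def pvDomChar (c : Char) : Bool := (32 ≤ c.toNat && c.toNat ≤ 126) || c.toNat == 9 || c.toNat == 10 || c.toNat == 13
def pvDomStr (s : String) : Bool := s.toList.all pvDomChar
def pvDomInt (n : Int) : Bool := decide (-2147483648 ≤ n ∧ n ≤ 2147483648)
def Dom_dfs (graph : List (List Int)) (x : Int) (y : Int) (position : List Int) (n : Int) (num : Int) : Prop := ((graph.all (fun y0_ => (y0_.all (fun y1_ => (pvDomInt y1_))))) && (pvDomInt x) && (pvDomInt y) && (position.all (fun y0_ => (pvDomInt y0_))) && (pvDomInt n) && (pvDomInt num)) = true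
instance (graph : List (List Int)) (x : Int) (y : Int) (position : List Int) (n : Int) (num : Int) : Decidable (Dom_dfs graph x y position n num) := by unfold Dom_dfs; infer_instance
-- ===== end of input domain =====

-- B replaces the recursive flood fill by an iterative DFS over an explicit frame stack
-- (objective: alternative decomposition, no recursion); both Pythons mutate `graph` in
-- place identically, and the equivalence proved here is about the RETURN value.

-- ===== PORT A =====
-- shared primitives of both Pythons (the literal expressions both sources contain)
def pvDirs : List (Int × Int) := [(-1, 0), (0, 1), (1, 0), (0, -1)]
-- graph[nx][ny] (defensive default 0; Pre_ guarantees the access is in range)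
def pvCell (g : List (List Int)) (i j : Int) : Int :=
  PySem.List.pyGetD (PySem.List.pyGetD g i []) j 0
-- graph[nx][ny] = 2 (in-place write, expressed functionally; only used with 0 ≤ i, 0 ≤ j)
def pvSet (g : List (List Int)) (i j : Int) (v : Int) : List (List Int) :=
  g.set i.toNat ((PySem.List.pyGetD g i []).set j.toNat v)
-- [position[0] + dx, position[1] + dy] (defensive default 0; Pre_ covers the access)
def pvNpos (pos : List Int) (d : Int × Int) : List Int :=
  [PySem.List.pyGetD pos 0 0 + d.1, PySem.List.pyGetD pos 1 0 + d.2]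
-- 0 <= nx < n and 0 <= ny < n and graph[nx][ny] == num
def pvCond (g : List (List Int)) (n num nx ny : Int) : Bool :=
  decide (0 ≤ nx) && decide (nx < n) && decide (0 ≤ ny) && decide (ny < n) &&
    decide (pvCell g nx ny = num)
-- fuel bound: number of cells equal to num, plus one (the recursion consumes one per call)
def pvCnt (g : List (List Int)) (num : Int) : Nat := (g.map (fun r => r.count num)).sum

-- A's `for i in range(4)` loop threading the mutated graph; `ds` are the remaining
-- directions; a recursive call re-enters with the full direction list. Fuel bounds the
-- recursion DEPTH only (none = fuel exhausted, never reached under Pre_).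
def dfsGo : Nat → List (Int × Int) → List (List Int) → Int → Int → List Int → Int → Int →
    Option (List (List Int) × List (List Int))
  | _, [], g, _, _, _, _, _ => some (g, [])
  | 0, d :: ds, g, x, y, pos, n, num =>
    if pvCond g n num (x + d.1) (y + d.2) then none
    else dfsGo 0 ds g x y pos n num
  | f + 1, d :: ds, g, x, y, pos, n, num =>
    if pvCond g n num (x + d.1) (y + d.2) then
      match dfsGo f pvDirs (pvSet g (x + d.1) (y + d.2) 2) (x + d.1) (y + d.2)
          (pvNpos pos d) n num with
      | none => none
      | some (g1, sub) =>
        match dfsGo (f + 1) ds g1 x y pos n num with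
        | none => none
        | some (g2, rest) => some (g2, (pvNpos pos d :: sub) ++ rest)
    else dfsGo (f + 1) ds g x y pos n num
termination_by f ds => (f, ds.length)
decreasing_by
  all_goals first
    | exact Prod.Lex.left _ _ (Nat.lt_succ_self _)
    | exact Prod.Lex.right _ (Nat.lt_succ_self _)

def dfs (graph : List (List Int)) (x : Int) (y : Int) (position : List Int) (n : Int) (num : Int) : List (List Int) :=
  match dfsGo (pvCnt graph num + 1) pvDirs graph x y position n num with
  | some r => position :: r.2
  | none => [position]

-- ===== PORT B =====
-- B's while loop: stack of frames (cx, cy, cpos, i); fuel = number of loop iterations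
-- (none = fuel exhausted, never reached under Pre_).
def loopB : Nat → List (List Int) → List (Int × Int × List Int × Int) → List (List Int) →
    Int → Int → Option (List (List Int) × List (List Int))
  | _, g, [], acc, _, _ => some (g, acc)
  | 0, _, _ :: _, _, _, _ => none
  | f + 1, g, (cx, cy, cpos, i) :: stk, acc, n, num =>
    if i = 4 then loopB f g stk acc n num
    else
      let d := PySem.List.pyGetD pvDirs i (0, 0)  -- xydic[i]; i ∈ {0,1,2,3} here
      if pvCond g n num (cx + d.1) (cy + d.2) then
        loopB f (pvSet g (cx + d.1) (cy + d.2) 2)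
          ((cx + d.1, cy + d.2, pvNpos cpos d, 0) :: (cx, cy, cpos, i + 1) :: stk)
          (acc ++ [pvNpos cpos d]) n num
      else loopB f g ((cx, cy, cpos, i + 1) :: stk) acc n num

def dfs_alt (graph : List (List Int)) (x : Int) (y : Int) (position : List Int) (n : Int) (num : Int) : List (List Int) :=
  match loopB (5 * (pvCnt graph num + 5)) graph [(x, y, position, 0)] [position] n num with
  | some r => r.2
  | none => [position]

-- ===== PRECONDITION & SPEC =====
-- the whole n×n window the DFS may touch physically exists in `graph`
def pvBig (g : List (List Int)) (n : Int) : Bool :=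
  decide (n ≤ (g.length : Int)) && (g.take n.toNat).all (fun r => decide (n ≤ (r.length : Int)))
-- some in-window neighbour of cell (x, y) equals num
def pvHit (g : List (List Int)) (x y n num : Int) : Bool :=
  pvDirs.any (fun d => pvCond g n num (x + d.1) (y + d.2))
-- every in-window neighbour of the start cell physically exists in the grid
def pvSafe (g : List (List Int)) (x y n : Int) : Bool :=
  pvDirs.all (fun d =>
    !(decide (0 ≤ x + d.1) && decide (x + d.1 < n) && decide (0 ≤ y + d.2) && decide (y + d.2 < n)) ||
      (PySem.List.pyGet? g (x + d.1)).elim false (fun row => (PySem.List.pyGet? row (y + d.2)).isSome))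
-- with num == 2, no in-window neighbour of the start cell that equals 2 itself has an
-- in-window neighbour equal to 2 (exactly the condition under which the recursion,
-- whose visited-marking is then a no-op, terminates: a 2-cell with a 2-neighbour
-- ping-pongs with it forever)
def pvTerm2 (g : List (List Int)) (x y n : Int) : Bool :=
  pvDirs.all (fun d =>
    !(pvCond g n 2 (x + d.1) (y + d.2)) || !(pvHit g (x + d.1) (y + d.2) n 2))
-- Pre_ excludes: grids whose n×n window is not physically present while some neighbour
-- matches or a probed cell is missing (A's bounds test is against n, so such grids
-- generally raise IndexError; the window condition is a closed-form over-approximation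
-- that also drops rare ragged-grid inputs where every probed cell happens to exist);
-- positions shorter than 2 when a neighbour matches (position[0]/position[1] raises
-- IndexError); and, for num == 2 only, the inputs on which the recursion never
-- terminates (A raises RecursionError, B loops) — terminating num == 2 inputs are kept.
def Pre_dfs (graph : List (List Int)) (x : Int) (y : Int) (position : List Int) (n : Int) (num : Int) : Prop :=
  (pvBig graph n = true ∨ (pvHit graph x y n num = false ∧ pvSafe graph x y n = true)) ∧
  (2 ≤ position.length ∨ pvHit graph x y n num = false) ∧
  (num ≠ 2 ∨ pvTerm2 graph x y n = true)
instance (graph : List (List Int)) (x : Int) (y : Int) (position : List Int) (n : Int) (num : Int) : Decidable (Pre_dfs graph x y position n num) := by unfold Pre_dfs; infer_instance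

def pvWitness_dfs : List (List Int) × Int × Int × List Int × Int × Int :=
  ([[1, 1], [1, 0]], 0, 0, [0, 0], 2, 1)

def Spec_dfs (graph : List (List Int)) (x : Int) (y : Int) (position : List Int) (n : Int) (num : Int) (out : List (List Int)) : Prop := out = dfs_alt graph x y position n num
instance (graph : List (List Int)) (x : Int) (y : Int) (position : List Int) (n : Int) (num : Int) (out : List (List Int)) : Decidable (Spec_dfs graph x y position n num out) := by unfold Spec_dfs; infer_instance

-- ===== CLAIM (what is proved, stated in full; the proofs are below) =====
def Claim_equal_dfs : Prop := ∀ (graph : List (List Int)) (x : Int) (y : Int) (position : List Int) (n : Int) (num : Int), Dom_dfs graph x y position n num → Pre_dfs graph x y position n num → Spec_dfs graph x y position n num (dfs graph x y position n num)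

-- ===== LEMMAS AND PROOFS =====

theorem dfsGo_nil (f : Nat) (g : List (List Int)) (x y : Int) (pos : List Int) (n num : Int) :
    dfsGo f [] g x y pos n num = some (g, []) := by
  cases f <;> rw [dfsGo]

theorem dfsGo_cons_neg (f : Nat) (d : Int × Int) (ds : List (Int × Int))
    (g : List (List Int)) (x y : Int) (pos : List Int) (n num : Int)
    (h : pvCond g n num (x + d.1) (y + d.2) = false) :
    dfsGo f (d :: ds) g x y pos n num = dfsGo f ds g x y pos n num := by
  cases f <;> (rw [dfsGo]; simp [h])

theorem dfsGo_cons_pos (f : Nat) (d : Int × Int) (ds : List (Int × Int))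
    (g : List (List Int)) (x y : Int) (pos : List Int) (n num : Int)
    (h : pvCond g n num (x + d.1) (y + d.2) = true) :
    dfsGo (f + 1) (d :: ds) g x y pos n num =
      match dfsGo f pvDirs (pvSet g (x + d.1) (y + d.2) 2) (x + d.1) (y + d.2)
          (pvNpos pos d) n num with
      | none => none
      | some (g1, sub) =>
        match dfsGo (f + 1) ds g1 x y pos n num with
        | none => none
        | some (g2, rest) => some (g2, (pvNpos pos d :: sub) ++ rest) := by
  rw [dfsGo]; try simp [h]

theorem dfsGo_cons_pos_zero (d : Int × Int) (ds : List (Int × Int))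
    (g : List (List Int)) (x y : Int) (pos : List Int) (n num : Int)
    (h : pvCond g n num (x + d.1) (y + d.2) = true) :
    dfsGo 0 (d :: ds) g x y pos n num = none := by
  rw [dfsGo]; try simp [h]

theorem loopB_nil (f : Nat) (g : List (List Int)) (acc : List (List Int)) (n num : Int) :
    loopB f g [] acc n num = some (g, acc) := by
  rw [loopB.eq_def]

theorem loopB_four (f : Nat) (g : List (List Int)) (cx cy : Int) (cpos : List Int)
    (stk : List (Int × Int × List Int × Int)) (acc : List (List Int)) (n num : Int) :
    loopB (f + 1) g ((cx, cy, cpos, 4) :: stk) acc n num = loopB f g stk acc n num := by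
  rw [loopB.eq_def]; simp

theorem loopB_step_neg (f : Nat) (g : List (List Int)) (cx cy : Int) (cpos : List Int)
    (i : Int) (stk : List (Int × Int × List Int × Int)) (acc : List (List Int)) (n num : Int)
    (hi : ¬ i = 4)
    (h : pvCond g n num (cx + (PySem.List.pyGetD pvDirs i (0, 0)).1)
        (cy + (PySem.List.pyGetD pvDirs i (0, 0)).2) = false) :
    loopB (f + 1) g ((cx, cy, cpos, i) :: stk) acc n num
      = loopB f g ((cx, cy, cpos, i + 1) :: stk) acc n num := by
  rw [loopB.eq_def]; simp [hi, h]

theorem loopB_step_pos (f : Nat) (g : List (List Int)) (cx cy : Int) (cpos : List Int)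
    (i : Int) (stk : List (Int × Int × List Int × Int)) (acc : List (List Int)) (n num : Int)
    (hi : ¬ i = 4)
    (h : pvCond g n num (cx + (PySem.List.pyGetD pvDirs i (0, 0)).1)
        (cy + (PySem.List.pyGetD pvDirs i (0, 0)).2) = true) :
    loopB (f + 1) g ((cx, cy, cpos, i) :: stk) acc n num
      = loopB f (pvSet g (cx + (PySem.List.pyGetD pvDirs i (0, 0)).1)
            (cy + (PySem.List.pyGetD pvDirs i (0, 0)).2) 2)
          ((cx + (PySem.List.pyGetD pvDirs i (0, 0)).1,
            cy + (PySem.List.pyGetD pvDirs i (0, 0)).2,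
            pvNpos cpos (PySem.List.pyGetD pvDirs i (0, 0)), 0)
            :: (cx, cy, cpos, i + 1) :: stk)
          (acc ++ [pvNpos cpos (PySem.List.pyGetD pvDirs i (0, 0))]) n num := by
  rw [loopB.eq_def]; simp [hi, h]

theorem pv_cond_unpack (g : List (List Int)) (n num nx ny : Int)
    (hc : pvCond g n num nx ny = true) :
    0 ≤ nx ∧ nx < n ∧ 0 ≤ ny ∧ ny < n ∧ pvCell g nx ny = num := by
  simp only [pvCond, Bool.and_eq_true, decide_eq_true_eq] at hc
  tauto

theorem pv_big_unpack (g : List (List Int)) (n : Int) (hbig : pvBig g n = true) :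
    n ≤ (g.length : Int) ∧ ∀ r ∈ g.take n.toNat, n ≤ (r.length : Int) := by
  simp only [pvBig, Bool.and_eq_true, decide_eq_true_eq, List.all_eq_true] at hbig
  tauto

-- structure of the marked cell: indices, row, row access, and the shape of pvSet

theorem pv_cell_facts (g : List (List Int)) (n num nx ny : Int)
    (hbig : pvBig g n = true) (hc : pvCond g n num nx ny = true) :
    ∃ (hi : nx.toNat < g.length) (hk : ny.toNat < g[nx.toNat].length),
      g[nx.toNat][ny.toNat] = num ∧
      pvSet g nx ny 2 = g.set nx.toNat (g[nx.toNat].set ny.toNat 2) ∧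
      n ≤ (g[nx.toNat].length : Int) := by
  obtain ⟨h0, h1, h2, h3, h4⟩ := pv_cond_unpack g n num nx ny hc
  obtain ⟨hga, hrows⟩ := pv_big_unpack g n hbig
  have hi : nx.toNat < g.length := by omega
  have hmem : g[nx.toNat] ∈ g.take n.toNat := by
    have hlt : nx.toNat < (g.take n.toNat).length := by simp; omega
    have : (g.take n.toNat)[nx.toNat] = g[nx.toNat] := List.getElem_take
    exact this ▸ List.getElem_mem hlt
  have hrl : n ≤ ((g[nx.toNat]).length : Int) := hrows _ hmem
  have hk : ny.toNat < (g[nx.toNat]).length := by omega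
  have hrowD : PySem.List.pyGetD g nx [] = g[nx.toNat] :=
    PySem.List.pyGetD_eq_getElem g [] h0 (by omega)
  have hcell : g[nx.toNat][ny.toNat] = num := by
    have := h4
    rw [pvCell, hrowD, PySem.List.pyGetD_eq_getElem _ 0 h2 (by omega)] at this
    exact this
  exact ⟨hi, hk, hcell, by rw [pvSet, hrowD], hrl⟩

theorem pv_set_big (g : List (List Int)) (n num nx ny : Int)
    (hbig : pvBig g n = true) (hc : pvCond g n num nx ny = true) :
    pvBig (pvSet g nx ny 2) n = true := by
  obtain ⟨hi, hk, hcell, hshape, hrl⟩ := pv_cell_facts g n num nx ny hbig hc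
  obtain ⟨hga, hrows⟩ := pv_big_unpack g n hbig
  rw [hshape]
  simp only [pvBig, Bool.and_eq_true, decide_eq_true_eq, List.all_eq_true]
  constructor
  · simpa using hga
  · intro r hr
    rw [List.take_set] at hr
    rcases List.mem_or_eq_of_mem_set hr with hmem | rfl
    · exact hrows r hmem
    · simpa using hrl

theorem pv_set_cnt (g : List (List Int)) (n num nx ny : Int)
    (hbig : pvBig g n = true) (hc : pvCond g n num nx ny = true) (hnum : num ≠ 2) :
    pvCnt (pvSet g nx ny 2) num + 1 = pvCnt g num := by
  obtain ⟨hi, hk, hcell, hshape, hrl⟩ := pv_cell_facts g n num nx ny hbig hc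
  rw [hshape]
  set i := nx.toNat
  set k := ny.toNat
  set row := g[i]
  have hcount : (row.set k 2).count num + 1 = row.count num := by
    have hpos : 0 < row.count num :=
      List.count_pos_iff.2 (hcell ▸ List.getElem_mem hk)
    have hcell' : row[k] = num := hcell
    rw [List.count_set hk]
    simp [hcell', Ne.symm hnum]
    omega
  have hmap : (g.set i (row.set k 2)).map (fun r => r.count num)
      = (g.map (fun r => r.count num)).set i ((row.set k 2).count num) := List.map_set
  have hself : g.map (fun r => r.count num)
      = (g.map (fun r => r.count num)).set i (row.count num) := by
    rw [show (row.count num) = (g.map (fun r => r.count num))[i]'(by simpa using hi) by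
      simp [row]]
    rw [List.set_getElem_self]
  rw [pvCnt, pvCnt, hmap, List.sum_set]
  conv_rhs => rw [hself, List.sum_set]
  have hlen : i < (g.map (fun r => r.count num)).length := by simpa using hi
  simp only [if_pos hlen]
  omega

-- with num = 2 the write is a no-op: the marked cell already holds 2
theorem pv_set_noop (g : List (List Int)) (n nx ny : Int)
    (hbig : pvBig g n = true) (hc : pvCond g n 2 nx ny = true) :
    pvSet g nx ny 2 = g := by
  obtain ⟨hi, hk, hcell, hshape, -⟩ := pv_cell_facts g n 2 nx ny hbig hc
  rw [hshape, show (2 : Int) = g[nx.toNat][ny.toNat] from hcell.symm,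
    List.set_getElem_self, List.set_getElem_self]

theorem pvDirs_drop_four : pvDirs.drop 4 = [] := by simp [pvDirs]

theorem pvDirs_len : pvDirs.length = 4 := by simp [pvDirs]

theorem pv_escape (fA : Nat) (g : List (List Int)) (x y : Int) (pos : List Int)
    (n num : Int) (h : pvHit g x y n num = false) :
    dfsGo fA pvDirs g x y pos n num = some (g, []) := by
  simp only [pvHit, pvDirs, List.any_cons, List.any_nil, Bool.or_eq_false_iff] at h
  obtain ⟨h0, h1, h2, h3, -⟩ := h
  rw [pvDirs, dfsGo_cons_neg fA (-1, 0) _ g x y pos n num h0,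
      dfsGo_cons_neg fA (0, 1) _ g x y pos n num h1,
      dfsGo_cons_neg fA (1, 0) _ g x y pos n num h2,
      dfsGo_cons_neg fA (0, -1) _ g x y pos n num h3, dfsGo_nil]

theorem pv_suff : ∀ (m fA j : Nat) (g : List (List Int)) (x y : Int) (pos : List Int)
    (n num : Int),
    m = 5 * fA + (4 - j) → j ≤ 4 → num ≠ 2 → pvBig g n = true → pvCnt g num < fA →
    ∃ gr subs, dfsGo fA (pvDirs.drop j) g x y pos n num = some (gr, subs)
      ∧ pvBig gr n = true ∧ pvCnt gr num + subs.length = pvCnt g num := by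
  intro m
  induction m using Nat.strong_induction_on with
  | _ m IH =>
    intro fA j g x y pos n num hm hj hnum hbig hcnt
    by_cases hj4 : j = 4
    · subst hj4
      rw [pvDirs_drop_four, dfsGo_nil]
      exact ⟨g, [], rfl, hbig, by simp⟩
    · have hjlt : j < 4 := by omega
      have hdrop : pvDirs.drop j = pvDirs[j]'(by rw [pvDirs_len]; omega) :: pvDirs.drop (j + 1) :=
        List.drop_eq_getElem_cons (by rw [pvDirs_len]; omega)
      set d := pvDirs[j]'(by rw [pvDirs_len]; omega) with hd
      rw [hdrop]
      by_cases hc : pvCond g n num (x + d.1) (y + d.2) = true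
      · cases fA with
        | zero => omega
        | succ fA' =>
          have hbig' := pv_set_big g n num (x + d.1) (y + d.2) hbig hc
          have hcnt' := pv_set_cnt g n num (x + d.1) (y + d.2) hbig hc hnum
          obtain ⟨g1, sub, hch, hbig1, hcnt1⟩ :=
            IH (5 * fA' + 4) (by omega) fA' 0 (pvSet g (x + d.1) (y + d.2) 2)
              (x + d.1) (y + d.2) (pvNpos pos d) n num (by omega) (by omega) hnum hbig'
              (by omega)
          obtain ⟨gr, rest, hrest, hbigr, hcntr⟩ :=
            IH (5 * (fA' + 1) + (4 - (j + 1))) (by omega) (fA' + 1) (j + 1) g1 x y pos n num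
              rfl (by omega) hnum hbig1 (by omega)
          refine ⟨gr, (pvNpos pos d :: sub) ++ rest, ?_, hbigr, ?_⟩
          · rw [List.drop_zero] at hch
            rw [dfsGo_cons_pos _ _ _ _ _ _ _ _ _ hc, hch]
            simp [hrest]
          · simp
            omega
      · have hcf : pvCond g n num (x + d.1) (y + d.2) = false := by
          simpa using hc
        rw [dfsGo_cons_neg _ _ _ _ _ _ _ _ _ hcf]
        exact IH (5 * fA + (4 - (j + 1))) (by omega) fA (j + 1) g x y pos n num rfl
          (by omega) hnum hbig hcnt

-- the terminating num = 2 case: every matched neighbour's own call finds no 2-neighbour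
-- and returns at once, the graph is never changed, and at most one cell per direction
-- is collected
theorem pv_suff_two : ∀ (m j fA : Nat) (g : List (List Int)) (x y : Int) (pos : List Int)
    (n : Int),
    m = 4 - j → j ≤ 4 → pvBig g n = true →
    (∀ d ∈ pvDirs, pvCond g n 2 (x + d.1) (y + d.2) = true →
      pvHit g (x + d.1) (y + d.2) n 2 = false) →
    ∃ subs, dfsGo (fA + 1) (pvDirs.drop j) g x y pos n 2 = some (g, subs)
      ∧ subs.length ≤ 4 - j := by
  intro m
  induction m using Nat.strong_induction_on with
  | _ m IH =>
    intro j fA g x y pos n hm hj hbig hsafe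
    by_cases hj4 : j = 4
    · subst hj4
      rw [pvDirs_drop_four, dfsGo_nil]
      exact ⟨[], rfl, by simp⟩
    · have hjlt : j < 4 := by omega
      have hdrop : pvDirs.drop j = pvDirs[j]'(by rw [pvDirs_len]; omega) :: pvDirs.drop (j + 1) :=
        List.drop_eq_getElem_cons (by rw [pvDirs_len]; omega)
      set d := pvDirs[j]'(by rw [pvDirs_len]; omega) with hd
      rw [hdrop]
      obtain ⟨subs', hrest, hlen'⟩ :=
        IH (4 - (j + 1)) (by omega) (j + 1) fA g x y pos n rfl (by omega) hbig hsafe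
      by_cases hc : pvCond g n 2 (x + d.1) (y + d.2) = true
      · have hnoop := pv_set_noop g n (x + d.1) (y + d.2) hbig hc
        have hmiss := hsafe d (hd ▸ List.getElem_mem _) hc
        have hch : dfsGo fA pvDirs (pvSet g (x + d.1) (y + d.2) 2) (x + d.1) (y + d.2)
            (pvNpos pos d) n 2 = some (g, []) := by
          rw [hnoop]; exact pv_escape fA g _ _ _ n 2 hmiss
        refine ⟨(pvNpos pos d :: []) ++ subs', ?_, by simp; omega⟩
        rw [dfsGo_cons_pos _ _ _ _ _ _ _ _ _ hc, hch]
        simp [hrest]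
      · have hcf : pvCond g n 2 (x + d.1) (y + d.2) = false := by simpa using hc
        rw [dfsGo_cons_neg _ _ _ _ _ _ _ _ _ hcf]
        exact ⟨subs', hrest, by omega⟩

theorem pv_bridge : ∀ (m fA j : Nat) (g : List (List Int)) (x y : Int) (pos : List Int)
    (n num : Int) (gr : List (List Int)) (subs : List (List Int)),
    m = 5 * fA + (4 - j) → j ≤ 4 →
    dfsGo fA (pvDirs.drop j) g x y pos n num = some (gr, subs) →
    ∀ (stk : List (Int × Int × List Int × Int)) (acc : List (List Int)) (f : Nat),
      loopB (f + ((4 - j) + 1 + 5 * subs.length)) g ((x, y, pos, (j : Int)) :: stk) acc n num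
        = loopB f gr stk (acc ++ subs) n num := by
  intro m
  induction m using Nat.strong_induction_on with
  | _ m IH =>
    intro fA j g x y pos n num gr subs hm hj hgo stk acc f
    by_cases hj4 : j = 4
    · subst hj4
      rw [pvDirs_drop_four, dfsGo_nil] at hgo
      simp only [Option.some.injEq, Prod.mk.injEq] at hgo
      obtain ⟨rfl, rfl⟩ := hgo
      have e : f + (4 - 4 + 1 + 5 * ([] : List (List Int)).length) = f + 1 := by simp
      rw [e, show ((4 : Nat) : Int) = 4 by norm_num, loopB_four, List.append_nil]
    · have hjlt : j < 4 := by omega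
      have hdrop : pvDirs.drop j = pvDirs[j]'(by rw [pvDirs_len]; omega) :: pvDirs.drop (j + 1) :=
        List.drop_eq_getElem_cons (by rw [pvDirs_len]; omega)
      set d := pvDirs[j]'(by rw [pvDirs_len]; omega) with hd
      have hlook : PySem.List.pyGetD pvDirs ((j : Nat) : Int) ((0 : Int), (0 : Int)) = d := by
        rw [PySem.List.pyGetD_natCast]
        exact List.getD_eq_getElem _ _ (by rw [pvDirs_len]; omega)
      have hi4 : ¬ ((j : Int) = 4) := by omega
      have hcast : ((j : Int) + 1) = (((j + 1 : Nat)) : Int) := by push_cast; ring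
      rw [hdrop] at hgo
      by_cases hc : pvCond g n num (x + d.1) (y + d.2) = true
      · cases fA with
        | zero =>
          rw [dfsGo_cons_pos_zero _ _ _ _ _ _ _ _ hc] at hgo
          cases hgo
        | succ fA' =>
          rw [dfsGo_cons_pos _ _ _ _ _ _ _ _ _ hc] at hgo
          cases hch : dfsGo fA' pvDirs (pvSet g (x + d.1) (y + d.2) 2) (x + d.1) (y + d.2)
              (pvNpos pos d) n num with
          | none => rw [hch] at hgo; simp at hgo
          | some p =>
            obtain ⟨g1, sub⟩ := p
            rw [hch] at hgo
            have hgo2 : (match dfsGo (fA' + 1) (pvDirs.drop (j + 1)) g1 x y pos n num with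
                | none => none
                | some (g2, rest) => some (g2, (pvNpos pos d :: sub) ++ rest))
                = some (gr, subs) := hgo
            clear hgo
            cases hrest : dfsGo (fA' + 1) (pvDirs.drop (j + 1)) g1 x y pos n num with
            | none => rw [hrest] at hgo2; simp at hgo2
            | some q =>
              obtain ⟨g2, rest⟩ := q
              rw [hrest] at hgo2
              simp only [Option.some.injEq, Prod.mk.injEq] at hgo2
              obtain ⟨rfl, rfl⟩ := hgo2
              have hch' : dfsGo fA' (pvDirs.drop 0) (pvSet g (x + d.1) (y + d.2) 2)
                  (x + d.1) (y + d.2) (pvNpos pos d) n num = some (g1, sub) := by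
                rw [List.drop_zero]; exact hch
              have hIH1 := IH (5 * fA' + 4) (by omega) fA' 0 (pvSet g (x + d.1) (y + d.2) 2)
                (x + d.1) (y + d.2) (pvNpos pos d) n num g1 sub (by omega) (by omega) hch'
              have hIH2 := IH (5 * (fA' + 1) + (4 - (j + 1))) (by omega) (fA' + 1) (j + 1)
                g1 x y pos n num g2 rest rfl (by omega) hrest
              have e1 : f + (4 - j + 1 + 5 * ((pvNpos pos d :: sub) ++ rest).length)
                  = ((f + ((4 - (j + 1)) + 1 + 5 * rest.length)) + ((4 - 0) + 1 + 5 * sub.length)) + 1 := by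
                simp; omega
              rw [e1, loopB_step_pos _ _ _ _ _ _ _ _ _ _ hi4 (by rw [hlook]; exact hc), hlook]
              rw [show ((0 : Int)) = ((0 : Nat) : Int) by norm_num, hIH1]
              rw [hcast, hIH2]
              simp
      · have hcf : pvCond g n num (x + d.1) (y + d.2) = false := by simpa using hc
        rw [dfsGo_cons_neg _ _ _ _ _ _ _ _ _ hcf] at hgo
        have e : f + (4 - j + 1 + 5 * subs.length)
            = (f + ((4 - (j + 1)) + 1 + 5 * subs.length)) + 1 := by omega
        rw [e, loopB_step_neg _ _ _ _ _ _ _ _ _ _ hi4 (by rw [hlook]; exact hcf)]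
        rw [hcast]
        exact IH (5 * fA + (4 - (j + 1))) (by omega) fA (j + 1) g x y pos n num gr subs rfl
          (by omega) hgo stk acc f

-- ===== VERDICT (by name: the statement is the Claim_ definition above) =====
theorem dfs_spec : Claim_equal_dfs := by
  intro graph x y position n num _ hpre
  obtain ⟨hwin, -, hterm⟩ := hpre
  have key : ∃ gr subs, dfsGo (pvCnt graph num + 1) pvDirs graph x y position n num
      = some (gr, subs) ∧ 5 + 5 * subs.length ≤ 5 * (pvCnt graph num + 5) := by
    by_cases hmiss : pvHit graph x y n num = false
    · exact ⟨graph, [], pv_escape _ _ _ _ _ _ _ hmiss, by simp only [List.length_nil]; omega⟩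
    · have hbig : pvBig graph n = true := by tauto
      by_cases h2 : num = 2
      · subst h2
        have ht : pvTerm2 graph x y n = true := hterm.resolve_left (by simp)
        have hsafe : ∀ d ∈ pvDirs, pvCond graph n 2 (x + d.1) (y + d.2) = true →
            pvHit graph (x + d.1) (y + d.2) n 2 = false := by
          intro d hd hc
          simp only [pvTerm2, List.all_eq_true] at ht
          have h := ht d hd
          rw [hc] at h
          simpa using h
        obtain ⟨subs, hgo, hlen⟩ :=
          pv_suff_two 4 0 (pvCnt graph 2) graph x y position n rfl (by omega) hbig hsafe
        exact ⟨graph, subs, by simpa using hgo, by omega⟩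
      · obtain ⟨gr, subs, hgo, -, hcnt⟩ :=
          pv_suff (5 * (pvCnt graph num + 1) + 4) (pvCnt graph num + 1) 0 graph x y position
            n num rfl (by omega) h2 hbig (Nat.lt_succ_self _)
        exact ⟨gr, subs, by simpa using hgo, by omega⟩
  obtain ⟨gr, subs, hgo, hlen⟩ := key
  have hb := pv_bridge (5 * (pvCnt graph num + 1) + 4) (pvCnt graph num + 1) 0 graph x y
    position n num gr subs rfl (by omega) (by simpa using hgo)
    [] [position] (5 * (pvCnt graph num + 5) - (5 + 5 * subs.length))
  have harith : 5 * (pvCnt graph num + 5) - (5 + 5 * subs.length) + ((4 - 0) + 1 + 5 * subs.length)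
      = 5 * (pvCnt graph num + 5) := by omega
  rw [harith] at hb
  norm_num at hb
  show dfs graph x y position n num = dfs_alt graph x y position n num
  unfold dfs dfs_alt
  rw [hgo, hb, loopB_nil]
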